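-- pv_equiv track=rewrite | github.com/daleyadrichem/LocalLLMDemo | scripts/ask_workspace.py | select_relevant_classes
-- ===== SOURCE A (Python) =====
-- from typing import Any, Dict, List, Tuple
--
-- def tokenize(text: str) -> List[str]:
--     """
--     Very lightweight tokenization for relevance scoring (no external deps).
--     """
--     return [t.strip(".,:;!?()[]{}\"'").lower() for t in text.split() if t.strip()]
--
-- def score_entry(question_tokens: List[str], interface: str, summary: str) -> int:
--     """
--     Simple relevance scoring: count how many question tokens appear in
--     interface+summary.
--     """
--     haystack = (interface + "\n" + summary).lower()
--     return sum(1 for t in question_tokens if t and t in haystack)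
--
-- def select_relevant_classes(
--     index: Dict[str, Dict[str, Dict[str, str]]],
--     question: str,
--     top_k: int,
-- ) -> List[Tuple[str, str, str, str]]:
--     """
--     Select top_k relevant (file_path, class_name, interface, summary) records.
--     """
--     q_tokens = tokenize(question)
--     scored: List[Tuple[int, str, str, str, str]] = []
--
--     for file_path, classes in index.items():
--         for class_name, data in classes.items():
--             interface = data.get("interface", "")
--             summary = data.get("summary", "")
--             s = score_entry(q_tokens, interface, summary)
--             if s > 0:
--                 scored.append((s, file_path, class_name, interface, summary))
--
--     scored.sort(key=lambda x: x[0], reverse=True)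
--     selected = scored[: max(top_k, 1)]
--
--     return [(fp, cn, iface, summ) for _, fp, cn, iface, summ in selected]
-- ===== SOURCE B (Python) =====
-- from typing import Dict, List, Tuple
--
-- def tokenize(text: str) -> List[str]:
--     return [t.strip(".,:;!?()[]{}\"'").lower() for t in text.split() if t.strip()]
--
-- def score_entry(question_tokens: List[str], interface: str, summary: str) -> int:
--     haystack = (interface + "\n" + summary).lower()
--     return sum(1 for t in question_tokens if t and t in haystack)
--
-- def select_relevant_classes(
--     index: Dict[str, Dict[str, Dict[str, str]]],
--     question: str,
--     top_k: int,
-- ) -> List[Tuple[str, str, str, str]]: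
--     q_tokens = tokenize(question)
--     flat = [
--         (score_entry(q_tokens, d.get("interface", ""), d.get("summary", "")),
--          fp, cn, d.get("interface", ""), d.get("summary", ""))
--         for fp, classes in index.items()
--         for cn, d in classes.items()
--     ]
--     flat = [x for x in flat if x[0] > 0]
--     hi = max((x[0] for x in flat), default=0)
--     ranked = [(fp, cn, iface, summ)
--               for s in range(hi, 0, -1)
--               for (sc, fp, cn, iface, summ) in flat
--               if sc == s]
--     return ranked[: max(top_k, 1)]
-- ===== Notes on version B (the rewrite author's own statement) =====
-- stated objective: alternative
-- what changed: Replaces A's accumulate-then-sort (append surviving entries to a flat list, stable reverse sort, slice) by staged comprehensions with no sort: build the scored list, take the maximum score, and emit entries by filtering the list once per score from the maximum down to 1, which reproduces the stable descending order.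
import Mathlib
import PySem

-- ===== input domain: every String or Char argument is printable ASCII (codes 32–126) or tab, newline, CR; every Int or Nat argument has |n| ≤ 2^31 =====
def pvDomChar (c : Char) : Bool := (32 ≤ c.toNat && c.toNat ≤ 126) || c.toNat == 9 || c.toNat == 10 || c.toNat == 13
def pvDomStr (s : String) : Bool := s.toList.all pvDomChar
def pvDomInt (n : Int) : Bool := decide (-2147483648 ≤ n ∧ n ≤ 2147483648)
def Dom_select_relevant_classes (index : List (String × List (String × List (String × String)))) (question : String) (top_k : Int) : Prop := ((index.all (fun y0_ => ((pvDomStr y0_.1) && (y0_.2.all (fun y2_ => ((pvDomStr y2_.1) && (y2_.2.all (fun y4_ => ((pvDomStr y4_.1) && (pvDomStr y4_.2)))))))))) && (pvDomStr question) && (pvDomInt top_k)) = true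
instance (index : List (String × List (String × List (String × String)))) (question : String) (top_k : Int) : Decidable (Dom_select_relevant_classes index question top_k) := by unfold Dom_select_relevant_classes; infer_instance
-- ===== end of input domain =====

-- B replaces A's accumulate-then-sort by staged comprehensions with no sort:
-- emit entries by filtering the scored list once per score, max down to 1
-- (alternative decomposition, same results including tie order).

-- shared same-module helpers (identical in Source A and Source B): tokenize, score_entry
def pvTokenize (text : String) : List String :=
  ((PySem.Str.split₀ text).filter (fun t => PySem.Str.strip t ≠ "")).map
    (fun t => PySem.Str.lower (PySem.Str.stripChars t ".,:;!?()[]{}\"'"))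

def pvScoreEntry (question_tokens : List String) (interface summary : String) : Int :=
  let haystack := PySem.Str.lower (interface ++ "\n" ++ summary)
  ((question_tokens.filter (fun t => t ≠ "" && PySem.Str.isIn t haystack)).map (fun _ => (1 : Int))).sum

-- ===== PORT A =====
def select_relevant_classes (index : List (String × List (String × List (String × String)))) (question : String) (top_k : Int) : List (String × String × String × String) :=
  let q_tokens := pvTokenize question
  let scored : List (Int × String × String × String × String) :=
    index.foldl (fun acc fc =>
      fc.2.foldl (fun acc cd =>
        let interface := (PySem.Dict.mk cd.2).getD "interface" ""
        let summary := (PySem.Dict.mk cd.2).getD "summary" ""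
        let s := pvScoreEntry q_tokens interface summary
        if 0 < s then acc ++ [(s, fc.1, cd.1, interface, summary)] else acc) acc) []
  let selected := PySem.List.slice (PySem.List.sorted scored (fun x => x.1) true) none (some (max top_k 1))
  selected.map (fun x => x.2)

-- ===== PORT B =====
def select_relevant_classes_alt (index : List (String × List (String × List (String × String)))) (question : String) (top_k : Int) : List (String × String × String × String) :=
  let q_tokens := pvTokenize question
  let flat0 : List (Int × String × String × String × String) :=
    index.flatMap (fun fc => fc.2.map (fun cd =>
      (pvScoreEntry q_tokens ((PySem.Dict.mk cd.2).getD "interface" "") ((PySem.Dict.mk cd.2).getD "summary" ""),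
       fc.1, cd.1, (PySem.Dict.mk cd.2).getD "interface" "", (PySem.Dict.mk cd.2).getD "summary" "")))
  let flat := flat0.filter (fun x => decide (0 < x.1))
  -- Python's max(gen, default=0): every element of flat is > 0, so a fold of max from 0 is exact
  let hi := (flat.map (fun x => x.1)).foldl max 0
  let ranked := (PySem.List.pyRange hi 0 (-1)).flatMap (fun s =>
      (flat.filter (fun x => x.1 == s)).map (fun x => x.2))
  PySem.List.slice ranked none (some (max top_k 1))

-- ===== PRECONDITION & SPEC =====
def Spec_select_relevant_classes (index : List (String × List (String × List (String × String)))) (question : String) (top_k : Int) (out : List (String × String × String × String)) : Prop := out = select_relevant_classes_alt index question top_k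
instance (index : List (String × List (String × List (String × String)))) (question : String) (top_k : Int) (out : List (String × String × String × String)) : Decidable (Spec_select_relevant_classes index question top_k out) := by unfold Spec_select_relevant_classes; infer_instance

-- ===== CLAIM (what is proved, stated in full; the proofs are below) =====
def Claim_equal_select_relevant_classes : Prop := ∀ (index : List (String × List (String × List (String × String)))) (question : String) (top_k : Int), Dom_select_relevant_classes index question top_k → Spec_select_relevant_classes index question top_k (select_relevant_classes index question top_k)

-- ===== LEMMAS AND PROOFS =====

-- insertBy passes over a prefix none of whose elements x goes before
theorem pv_insertBy_append {α : Type} (bf : α → α → Bool) (x : α) (b r : List α)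
    (h : ∀ y ∈ b, bf x y = false) :
    PySem.List.insertBy bf x (b ++ r) = b ++ PySem.List.insertBy bf x r := by
  induction b with
  | nil => rfl
  | cons y ys ih =>
      simp only [List.cons_append]
      rw [show PySem.List.insertBy bf x (y :: (ys ++ r)) = if bf x y then x :: y :: (ys ++ r) else y :: PySem.List.insertBy bf x (ys ++ r) from by simp [PySem.List.insertBy]]
      rw [h y (by simp)]
      simp only [Bool.false_eq_true, if_false, List.cons.injEq, true_and]
      exact ih (fun z hz => h z (by simp [hz]))

-- insertBy puts x in front when x goes before every element
theorem pv_insertBy_front {α : Type} (bf : α → α → Bool) (x : α) (r : List α)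
    (h : ∀ y ∈ r, bf x y = true) :
    PySem.List.insertBy bf x r = x :: r := by
  cases r with
  | nil => rfl
  | cons y ys => simp [PySem.List.insertBy, h y (by simp)]

-- appending one element to a descending bucket concatenation
theorem pv_insert_bucket {β : Type} (ss : List Int) (L : List (Int × β)) (x : Int × β)
    (hss : ss.Pairwise (· > ·)) (hx : x.1 ∈ ss) :
    PySem.List.insertBy (fun a b => decide ((fun p : Int × β => p.1) b < (fun p : Int × β => p.1) a)) x
      (ss.flatMap (fun s => L.filter (fun p => p.1 == s)))
    = ss.flatMap (fun s => (L ++ [x]).filter (fun p => p.1 == s)) := by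
  induction ss generalizing L with
  | nil => simp at hx
  | cons s ss' ih =>
      rw [List.pairwise_cons] at hss
      have hfilt : ∀ (M : List (Int × β)) (c : Int) (y : Int × β),
          y ∈ M.filter (fun p => p.1 == c) → y.1 = c := by
        intro M c y hy
        have := List.of_mem_filter hy
        simpa using this
      have htail : ∀ y ∈ ss'.flatMap (fun s => L.filter (fun p => p.1 == s)), y.1 ∈ ss' := by
        intro y hy
        rcases List.mem_flatMap.1 hy with ⟨c, hc, hyc⟩
        rw [hfilt L c y hyc]; exact hc
      by_cases hxs : x.1 = s
      · -- x lands at the end of the s-bucket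
        have h1 : ∀ y ∈ L.filter (fun p => p.1 == s),
            (fun a b : Int × β => decide (b.1 < a.1)) x y = false := by
          intro y hy
          have := hfilt L s y hy
          simp [this, hxs]
        rw [List.flatMap_cons, pv_insertBy_append _ _ _ _ h1,
          pv_insertBy_front _ _ _ (by
            intro y hy
            have hmem := htail y hy
            have := hss.1 y.1 hmem
            simp [hxs]; omega)]
        rw [List.flatMap_cons]
        have h2 : (L ++ [x]).filter (fun p => p.1 == s) = L.filter (fun p => p.1 == s) ++ [x] := by
          simp [List.filter_append, hxs]
        have h3 : ss'.flatMap (fun c => (L ++ [x]).filter (fun p => p.1 == c))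
            = ss'.flatMap (fun c => L.filter (fun p => p.1 == c)) := by
          apply List.flatMap_congr
          intro c hc
          have hlt := hss.1 c hc
          simp [List.filter_append]
          intro h; omega
        rw [h2, h3]; simp
      · -- x skips the s-bucket and recurses
        have hx' : x.1 ∈ ss' := by
          rcases List.mem_cons.1 hx with h | h
          · exact absurd h hxs
          · exact h
        have h1 : ∀ y ∈ L.filter (fun p => p.1 == s),
            (fun a b : Int × β => decide (b.1 < a.1)) x y = false := by
          intro y hy
          have hy1 := hfilt L s y hy
          have := hss.1 x.1 hx'
          simp [hy1]; omega
        rw [List.flatMap_cons, pv_insertBy_append _ _ _ _ h1, ih L hss.2 hx']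
        rw [List.flatMap_cons]
        have h2 : (L ++ [x]).filter (fun p => p.1 == s) = L.filter (fun p => p.1 == s) := by
          simp [List.filter_append, hxs]
        rw [h2]

-- stable reverse sort by an Int key = descending bucket concatenation
theorem pv_sorted_rev_buckets {β : Type} (ss : List Int) (L : List (Int × β))
    (hss : ss.Pairwise (· > ·)) (hL : ∀ x ∈ L, x.1 ∈ ss) :
    PySem.List.sorted L (fun p => p.1) true = ss.flatMap (fun s => L.filter (fun p => p.1 == s)) := by
  induction L using List.reverseRecOn with
  | nil => simp [PySem.List.sorted]
  | append_singleton M x ih =>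
      rw [PySem.List.sorted_rev_eq_foldl_insertBy, List.foldl_append, List.foldl_cons, List.foldl_nil,
        ← PySem.List.sorted_rev_eq_foldl_insertBy,
        ih (fun y hy => hL y (by simp [hy]))]
      exact pv_insert_bucket ss M x hss (hL x (by simp))

-- generic item function both versions compute per (file_path, (class_name, data))
def pvItem (q : List String) (fp : String) (cd : String × List (String × String)) :
    Int × String × String × String × String :=
  (pvScoreEntry q ((PySem.Dict.mk cd.2).getD "interface" "") ((PySem.Dict.mk cd.2).getD "summary" ""),
   fp, cd.1, (PySem.Dict.mk cd.2).getD "interface" "", (PySem.Dict.mk cd.2).getD "summary" "")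

-- A's nested scan builds the filtered flat list
theorem pv_scanA_gen {β γ : Type} (l : List (String × List β)) (item : String → β → Int × γ)
    (acc : List (Int × γ)) :
    l.foldl (fun acc fc => fc.2.foldl (fun acc cd =>
        if 0 < (item fc.1 cd).1 then acc ++ [item fc.1 cd] else acc) acc) acc
    = acc ++ (l.flatMap (fun fc => fc.2.map (fun cd => item fc.1 cd))).filter (fun p => decide (0 < p.1)) := by
  induction l generalizing acc with
  | nil => simp
  | cons fc rest ih =>
      rw [List.foldl_cons, PySem.List.foldl_append_ite (fun cd => 0 < (item fc.1 cd).1) (fun cd => item fc.1 cd), ih]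
      rw [List.flatMap_cons, List.filter_append, List.filter_map, List.append_assoc]
      rfl

-- ===== VERDICT (by name: the statement is the Claim_ definition above) =====
theorem select_relevant_classes_spec : Claim_equal_select_relevant_classes := by
  intro index question top_k _
  show select_relevant_classes index question top_k = select_relevant_classes_alt index question top_k
  have hA : select_relevant_classes index question top_k
      = (PySem.List.slice (PySem.List.sorted
           (index.foldl (fun acc fc => fc.2.foldl (fun acc cd =>
              if 0 < (pvItem (pvTokenize question) fc.1 cd).1 then
                acc ++ [pvItem (pvTokenize question) fc.1 cd] else acc) acc) [])
           (fun x => x.1) true) none (some (max top_k 1))).map (fun x => x.2) := rfl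
  have hB : select_relevant_classes_alt index question top_k
      = PySem.List.slice
          ((PySem.List.pyRange
              ((((index.flatMap (fun fc => fc.2.map (fun cd => pvItem (pvTokenize question) fc.1 cd))).filter
                   (fun p => decide (0 < p.1))).map (fun x => x.1)).foldl max 0) 0 (-1)).flatMap (fun s =>
            (((index.flatMap (fun fc => fc.2.map (fun cd => pvItem (pvTokenize question) fc.1 cd))).filter
                (fun p => decide (0 < p.1))).filter (fun x => x.1 == s)).map (fun x => x.2)))
          none (some (max top_k 1)) := rfl
  rw [hA, hB, pv_scanA_gen index (pvItem (pvTokenize question)) [], List.nil_append]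
  set L := (index.flatMap (fun fc => fc.2.map (fun cd => pvItem (pvTokenize question) fc.1 cd))).filter
      (fun p => decide (0 < p.1)) with hLdef
  rw [List.foldl_map]
  set m := L.foldl (fun m p => max m p.1) 0 with hmdef
  have hmax := PySem.List.le_foldl_max_int L (fun p => p.1) 0
  have hub : ∀ p ∈ L, p.1 ≤ m := hmax.2
  have hpos : ∀ p ∈ L, 1 ≤ p.1 := by
    intro p hp
    have := List.of_mem_filter hp
    simp at this; omega
  have hss := PySem.List.pyRange_neg_one m 0
  have hpw : (PySem.List.pyRange m 0 (-1)).Pairwise (· > ·) := by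
    rw [hss]
    exact List.Pairwise.map _ (fun a b (h : a < b) => by omega) List.pairwise_lt_range
  have hmem : ∀ p ∈ L, p.1 ∈ PySem.List.pyRange m 0 (-1) := by
    intro p hp
    rw [hss]
    refine List.mem_map.2 ⟨(m - p.1).toNat, List.mem_range.2 ?_, ?_⟩
    · have := hpos p hp; have := hub p hp; omega
    · have := hpos p hp; have := hub p hp; omega
  rw [pv_sorted_rev_buckets (PySem.List.pyRange m 0 (-1)) L hpw hmem]
  rw [PySem.List.slice_to _ (le_trans (by omega : (0:Int) ≤ 1) (le_max_right top_k 1)),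
      PySem.List.slice_to _ (le_trans (by omega : (0:Int) ≤ 1) (le_max_right top_k 1))]
  rw [List.map_take, List.map_flatMap]
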